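-- pv_equiv track=rewrite | github.com/zallison/foghorn | src/foghorn/utils/config_diagram.py | _escape_dot_label
-- ===== SOURCE A (Python) =====
-- _ESCAPE_DOT_REPLACEMENTS = {
--     "\\": "\\\\",
--     '"': '\\"',
--     "\n": "\\n",
-- }
--
-- def _escape_dot_label(text: str) -> str:
--     """Brief: Escape a string for use inside a GraphViz dot double-quoted label.
--
--     Inputs:
--       - text: Label text.
--
--     Outputs:
--       - str: Escaped label text.
--
--     Notes:
--       - We use dot's normal string labels ("...") rather than HTML labels.
--       - Newlines are represented as "\\n".
--       - Comma-separated segments are split onto separate lines to keep nodes narrow.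
--     """
--
--     out = str(text)
--
--     # Keep label blocks readable by splitting delimiter-separated segments onto new lines.
--     # Handle both delimited+space and bare delimiter.
--     out = out.replace(", ", "\n")
--     out = out.replace(",", "\n")
--     out = out.replace("; ", "\n")
--     out = out.replace(";", "\n")
--
--     for orig, repl in _ESCAPE_DOT_REPLACEMENTS.items():
--         out = out.replace(orig, repl)
--     return out
-- ===== SOURCE B (Python) =====
-- def _escape_dot_label(text: str) -> str:
--     """Single left-to-right scan instead of six sequential .replace() passes (one pass, same result)."""
--     s = str(text)
--     out = []
--     i = 0
--     n = len(s)
--     while i < n: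
--         c = s[i]
--         i += 1
--         if c == ',' or c == ';':
--             out.append('\\n')
--             if i < n and s[i] == ' ':
--                 i += 1
--         elif c == '\\':
--             out.append('\\\\')
--         elif c == '"':
--             out.append('\\"')
--         elif c == '\n':
--             out.append('\\n')
--         else:
--             out.append(c)
--     return ''.join(out)
-- ===== Notes on version B (the rewrite author's own statement) =====
-- stated objective: alternative
-- what changed: Replaces the six sequential whole-string .replace() passes with a single left-to-right scan that handles delimiter splitting (with one-space consumption) and character escaping in one pass, building the result in a list.
import Mathlib
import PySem

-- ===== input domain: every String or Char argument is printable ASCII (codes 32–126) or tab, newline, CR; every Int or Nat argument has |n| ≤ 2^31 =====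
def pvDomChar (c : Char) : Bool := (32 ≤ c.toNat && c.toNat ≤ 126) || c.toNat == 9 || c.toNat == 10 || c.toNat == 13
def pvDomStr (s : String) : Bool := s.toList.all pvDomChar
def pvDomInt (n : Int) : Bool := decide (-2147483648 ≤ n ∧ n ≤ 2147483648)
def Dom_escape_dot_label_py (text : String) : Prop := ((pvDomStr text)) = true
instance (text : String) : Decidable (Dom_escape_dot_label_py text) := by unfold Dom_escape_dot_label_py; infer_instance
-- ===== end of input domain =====

-- B replaces A's six sequential whole-string replace passes by one left-to-right scan doing delimiter splitting and escaping in a single pass (objective: alternative).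

-- ===== PORT A =====
-- literal transliteration: four delimiter replaces, then the dict's three escape replaces in insertion order
def escape_dot_label_py (text : String) : String :=
  let out := text
  let out := PySem.Str.replace out ", " "\n"
  let out := PySem.Str.replace out "," "\n"
  let out := PySem.Str.replace out "; " "\n"
  let out := PySem.Str.replace out ";" "\n"
  let out := PySem.Str.replace out "\\" "\\\\"
  let out := PySem.Str.replace out "\"" "\\\""
  let out := PySem.Str.replace out "\n" "\\n"
  out

-- ===== PORT B =====
-- B's single scan: on ',' or ';' emit "\n" (two chars) and consume one following space;
-- escape '\', '"' and a real newline; copy everything else.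
def pvScanB : List Char → List Char
  | [] => []
  | ',' :: ' ' :: t => '\\' :: 'n' :: pvScanB t
  | ';' :: ' ' :: t => '\\' :: 'n' :: pvScanB t
  | ',' :: t => '\\' :: 'n' :: pvScanB t
  | ';' :: t => '\\' :: 'n' :: pvScanB t
  | '\\' :: t => '\\' :: '\\' :: pvScanB t
  | '"' :: t => '\\' :: '"' :: pvScanB t
  | '\n' :: t => '\\' :: 'n' :: pvScanB t
  | c :: t => c :: pvScanB t

def escape_dot_label_py_alt (text : String) : String :=
  String.ofList (pvScanB text.toList)

-- ===== PRECONDITION & SPEC =====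
def Spec_escape_dot_label_py (text : String) (out : String) : Prop := out = escape_dot_label_py_alt text
instance (text : String) (out : String) : Decidable (Spec_escape_dot_label_py text out) := by unfold Spec_escape_dot_label_py; infer_instance

-- ===== CLAIM (what is proved, stated in full; the proofs are below) =====
def Claim_equal_escape_dot_label_py : Prop := ∀ (text : String), Dom_escape_dot_label_py text → Spec_escape_dot_label_py text (escape_dot_label_py text)

-- ===== LEMMAS AND PROOFS =====

-- generic facts about PySem.Chars.replace (nonempty pattern)

theorem pvGo_nil (old new : List Char) (f : Nat) (acc : List Char) :
    PySem.Chars.replace.go old new f [] acc = acc.reverse := by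
  cases f <;> simp [PySem.Chars.replace.go]

theorem pvGo_acc (old new : List Char) (f : Nat) :
    ∀ (l acc : List Char),
      PySem.Chars.replace.go old new f l acc = acc.reverse ++ PySem.Chars.replace.go old new f l [] := by
  induction f with
  | zero => intro l acc; simp [PySem.Chars.replace.go]
  | succ f ih =>
    intro l acc
    cases l with
    | nil => simp [pvGo_nil]
    | cons c t =>
      by_cases h : old.isPrefixOf (c :: t) = true
      · simp only [PySem.Chars.replace.go, h, if_pos]
        rw [ih _ (new.reverse ++ acc), ih _ (new.reverse ++ [])]
        simp
      · simp only [PySem.Chars.replace.go, h, if_neg, Bool.not_eq_true]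
        rw [ih t (c :: acc), ih t [c]]
        simp

theorem pvGo_fuel (old new : List Char) (hold : old ≠ []) :
    ∀ (f f' : Nat) (l acc : List Char), l.length ≤ f → l.length ≤ f' →
      PySem.Chars.replace.go old new f l acc = PySem.Chars.replace.go old new f' l acc := by
  intro f
  induction f with
  | zero =>
    intro f' l acc h h'
    have : l = [] := by cases l <;> simp_all
    subst this; simp [pvGo_nil]
  | succ f ih =>
    intro f' l acc h h'
    cases l with
    | nil => simp [pvGo_nil]
    | cons c t =>
      cases f' with
      | zero => simp at h'
      | succ f' =>
        by_cases hp : old.isPrefixOf (c :: t) = true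
        · simp only [PySem.Chars.replace.go, hp, if_pos]
          have hlen : ((c :: t).drop old.length).length ≤ t.length := by
            have : 1 ≤ old.length := by cases old <;> simp_all
            simp [List.length_drop]; omega
          exact ih f' _ _ (le_trans hlen (Nat.lt_succ_iff.mp (Nat.lt_of_succ_le h)))
            (le_trans hlen (Nat.lt_succ_iff.mp (Nat.lt_of_succ_le h')))
        · simp only [PySem.Chars.replace.go, hp, if_neg, Bool.not_eq_true]
          exact ih f' _ _ (Nat.lt_succ_iff.mp (Nat.lt_of_succ_le h))
            (Nat.lt_succ_iff.mp (Nat.lt_of_succ_le h'))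

theorem pvReplace_nil (old new : List Char) (hold : old ≠ []) :
    PySem.Chars.replace [] old new = [] := by
  have : old.isEmpty = false := by cases old <;> simp_all
  simp [PySem.Chars.replace, this, pvGo_nil]

theorem pvReplace_cons_neg (old new : List Char) (c : Char) (t : List Char)
    (hold : old ≠ []) (h : old.isPrefixOf (c :: t) = false) :
    PySem.Chars.replace (c :: t) old new = c :: PySem.Chars.replace t old new := by
  have he : old.isEmpty = false := by cases old <;> simp_all
  simp only [PySem.Chars.replace, he, if_neg, Bool.false_eq_true, not_false_iff,
    List.length_cons]
  simp only [PySem.Chars.replace.go, h, if_neg, Bool.not_eq_true]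
  rw [pvGo_acc]
  simp

theorem pvReplace_cons_pos (old new : List Char) (c : Char) (t : List Char)
    (hold : old ≠ []) (h : old.isPrefixOf (c :: t) = true) :
    PySem.Chars.replace (c :: t) old new
      = new ++ PySem.Chars.replace ((c :: t).drop old.length) old new := by
  have he : old.isEmpty = false := by cases old <;> simp_all
  simp only [PySem.Chars.replace, he, if_neg, Bool.false_eq_true, not_false_iff,
    List.length_cons]
  simp only [PySem.Chars.replace.go, h, if_pos]
  rw [pvGo_acc]
  have hlen : ((c :: t).drop old.length).length ≤ t.length := by
    have : 1 ≤ old.length := by cases old <;> simp_all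
    simp [List.length_drop]; omega
  rw [pvGo_fuel old new hold t.length ((c :: t).drop old.length).length _ [] hlen le_rfl]
  simp

-- stage scans

def pvScanC : List Char → List Char
  | [] => []
  | ',' :: ' ' :: t => '\n' :: pvScanC t
  | ',' :: t => '\n' :: pvScanC t
  | c :: t => c :: pvScanC t

def pvScanS : List Char → List Char
  | [] => []
  | ';' :: ' ' :: t => '\n' :: pvScanS t
  | ';' :: t => '\n' :: pvScanS t
  | c :: t => c :: pvScanS t

def pvScanD : List Char → List Char
  | [] => []
  | ',' :: ' ' :: t => '\n' :: pvScanD t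
  | ';' :: ' ' :: t => '\n' :: pvScanD t
  | ',' :: t => '\n' :: pvScanD t
  | ';' :: t => '\n' :: pvScanD t
  | c :: t => c :: pvScanD t

def pvScanE : List Char → List Char
  | [] => []
  | '\\' :: t => '\\' :: '\\' :: pvScanE t
  | '"' :: t => '\\' :: '"' :: pvScanE t
  | '\n' :: t => '\\' :: 'n' :: pvScanE t
  | c :: t => c :: pvScanE t

theorem pvL1 (l : List Char) :
    PySem.Chars.replace (PySem.Chars.replace l [',', ' '] ['\n']) [','] ['\n'] = pvScanC l := by
  induction l using pvScanC.induct with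
  | case1 => rw [pvReplace_nil _ _ (by decide), pvReplace_nil _ _ (by decide)]; rfl
  | case2 t ih =>
    rw [pvReplace_cons_pos _ _ _ _ (by decide) (by simp [List.isPrefixOf])]
    simp only [List.length_cons, List.length_nil, List.drop_succ_cons, List.drop_zero,
      List.singleton_append]
    rw [pvReplace_cons_neg _ _ _ _ (by decide) (by simp [List.isPrefixOf]), ih]
    rfl
  | case3 t hns ih =>
    have hp : ([',', ' '].isPrefixOf (',' :: t)) = false := by
      cases t with
      | nil => decide
      | cons d t' =>
        have hd : d ≠ ' ' := fun h => hns t' (by rw [h])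
        simp [List.isPrefixOf]; exact fun h => hd h.symm
    rw [pvReplace_cons_neg _ _ _ _ (by decide) hp,
      pvReplace_cons_pos _ _ _ _ (by decide) (by simp [List.isPrefixOf])]
    simp only [List.length_cons, List.length_nil, List.drop_succ_cons, List.drop_zero,
      List.singleton_append]
    rw [ih, pvScanC.eq_3 t hns]
  | case4 c t h2 h1 ih =>
    have hc : c ≠ ',' := fun h => h1 h
    have hp1 : ([',', ' '].isPrefixOf (c :: t)) = false := by
      simp [List.isPrefixOf]; intro h; exact absurd h.symm hc
    have hp2 : ([','].isPrefixOf (c :: PySem.Chars.replace t [',', ' '] ['\n'])) = false := by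
      simp [List.isPrefixOf]; exact fun h => hc h.symm
    rw [pvReplace_cons_neg _ _ _ _ (by decide) hp1,
      pvReplace_cons_neg _ _ _ _ (by decide) hp2, ih, pvScanC.eq_4 c t h2 h1]


theorem pvL2 (l : List Char) :
    PySem.Chars.replace (PySem.Chars.replace l [';', ' '] ['\n']) [';'] ['\n'] = pvScanS l := by
  induction l using pvScanS.induct with
  | case1 => rw [pvReplace_nil _ _ (by decide), pvReplace_nil _ _ (by decide)]; rfl
  | case2 t ih =>
    rw [pvReplace_cons_pos _ _ _ _ (by decide) (by simp [List.isPrefixOf])]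
    simp only [List.length_cons, List.length_nil, List.drop_succ_cons, List.drop_zero,
      List.singleton_append]
    rw [pvReplace_cons_neg _ _ _ _ (by decide) (by simp [List.isPrefixOf]), ih]
    rfl
  | case3 t hns ih =>
    have hp : ([';', ' '].isPrefixOf (';' :: t)) = false := by
      cases t with
      | nil => decide
      | cons d t' =>
        have hd : d ≠ ' ' := fun h => hns t' (by rw [h])
        simp [List.isPrefixOf]; exact fun h => hd h.symm
    rw [pvReplace_cons_neg _ _ _ _ (by decide) hp,
      pvReplace_cons_pos _ _ _ _ (by decide) (by simp [List.isPrefixOf])]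
    simp only [List.length_cons, List.length_nil, List.drop_succ_cons, List.drop_zero,
      List.singleton_append]
    rw [ih, pvScanS.eq_3 t hns]
  | case4 c t h2 h1 ih =>
    have hc : c ≠ ';' := fun h => h1 h
    have hp1 : ([';', ' '].isPrefixOf (c :: t)) = false := by
      simp [List.isPrefixOf]; intro h; exact absurd h.symm hc
    have hp2 : ([';'].isPrefixOf (c :: PySem.Chars.replace t [';', ' '] ['\n'])) = false := by
      simp [List.isPrefixOf]; exact fun h => hc h.symm
    rw [pvReplace_cons_neg _ _ _ _ (by decide) hp1,
      pvReplace_cons_neg _ _ _ _ (by decide) hp2, ih, pvScanS.eq_4 c t h2 h1]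

theorem pvScanC_no_space (t : List Char) (h : ∀ u, t = ' ' :: u → False) :
    ∀ u, pvScanC t = ' ' :: u → False := by
  cases t with
  | nil => intro u hu; simp [pvScanC] at hu
  | cons d t' =>
    have hd : d ≠ ' ' := fun hh => h t' (by rw [hh])
    by_cases hc : d = ','
    · subst hc
      cases t' with
      | nil => intro u hu; simp [pvScanC] at hu
      | cons e t'' =>
        by_cases he : e = ' '
        · subst he; rw [pvScanC.eq_2]; intro u hu; exact absurd (List.cons.injEq .. ▸ hu).1 (by decide)
        · rw [pvScanC.eq_3 _ (fun u hu => he (List.cons.injEq .. ▸ hu).1)]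
          intro u hu; exact absurd (List.cons.injEq .. ▸ hu).1 (by decide)
    · rw [pvScanC.eq_4 d t' (fun _ hh _ => hc hh) (fun hh => hc hh)]
      intro u hu; exact hd (List.cons.injEq .. ▸ hu).1

theorem pvL3 (l : List Char) : pvScanS (pvScanC l) = pvScanD l := by
  induction l using pvScanD.induct with
  | case1 => rfl
  | case2 t ih =>
    rw [pvScanC.eq_2, pvScanS.eq_4 _ _ (fun _ hh _ => absurd hh (by decide)) (fun hh => absurd hh (by decide)),
      ih, pvScanD.eq_2]
  | case3 t ih =>
    rw [pvScanC.eq_4 _ _ (fun _ hh _ => absurd hh (by decide)) (fun hh => absurd hh (by decide)),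
      pvScanC.eq_4 _ _ (fun _ hh _ => absurd hh (by decide)) (fun hh => absurd hh (by decide)),
      pvScanS.eq_2, ih, pvScanD.eq_3]
  | case4 t hns ih =>
    rw [pvScanC.eq_3 t hns,
      pvScanS.eq_4 _ _ (fun _ hh _ => absurd hh (by decide)) (fun hh => absurd hh (by decide)),
      ih, pvScanD.eq_4 t hns]
  | case5 t hns ih =>
    rw [pvScanC.eq_4 _ _ (fun _ hh _ => absurd hh (by decide)) (fun hh => absurd hh (by decide)),
      pvScanS.eq_3 _ (fun u hu => pvScanC_no_space t hns u hu), ih, pvScanD.eq_5 t hns]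
  | case6 c t h1 h2 h3 h4 ih =>
    rw [pvScanC.eq_4 c t h1 h3, pvScanS.eq_4 c _ (fun _ hh _ => h4 hh) h4, ih,
      pvScanD.eq_6 c t h1 h2 h3 h4]

theorem pvL4 (l : List Char) :
    PySem.Chars.replace
      (PySem.Chars.replace
        (PySem.Chars.replace l ['\\'] ['\\', '\\']) ['"'] ['\\', '"']) ['\n'] ['\\', 'n']
      = pvScanE l := by
  induction l using pvScanE.induct with
  | case1 => rw [pvReplace_nil _ _ (by decide), pvReplace_nil _ _ (by decide),
      pvReplace_nil _ _ (by decide)]; rfl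
  | case2 t ih =>
    rw [pvReplace_cons_pos _ _ _ _ (by decide) (by simp [List.isPrefixOf])]
    simp only [List.length_cons, List.length_nil, List.drop_succ_cons, List.drop_zero,
      List.cons_append, List.nil_append]
    rw [pvReplace_cons_neg _ _ _ _ (by decide) (by simp [List.isPrefixOf]),
      pvReplace_cons_neg _ _ _ _ (by decide) (by simp [List.isPrefixOf]),
      pvReplace_cons_neg _ _ _ _ (by decide) (by simp [List.isPrefixOf]),
      pvReplace_cons_neg _ _ _ _ (by decide) (by simp [List.isPrefixOf]), ih, pvScanE.eq_2]
  | case3 t ih =>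
    rw [pvReplace_cons_neg _ _ _ _ (by decide) (by simp [List.isPrefixOf]),
      pvReplace_cons_pos _ _ _ _ (by decide) (by simp [List.isPrefixOf])]
    simp only [List.length_cons, List.length_nil, List.drop_succ_cons, List.drop_zero,
      List.cons_append, List.nil_append]
    rw [pvReplace_cons_neg _ _ _ _ (by decide) (by simp [List.isPrefixOf]),
      pvReplace_cons_neg _ _ _ _ (by decide) (by simp [List.isPrefixOf]), ih, pvScanE.eq_3]
  | case4 t ih =>
    rw [pvReplace_cons_neg _ _ _ _ (by decide) (by simp [List.isPrefixOf]),
      pvReplace_cons_neg _ _ _ _ (by decide) (by simp [List.isPrefixOf]),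
      pvReplace_cons_pos _ _ _ _ (by decide) (by simp [List.isPrefixOf])]
    simp only [List.length_cons, List.length_nil, List.drop_succ_cons, List.drop_zero,
      List.cons_append, List.nil_append]
    rw [ih, pvScanE.eq_4]
  | case5 c t h1 h2 h3 ih =>
    rw [pvReplace_cons_neg _ _ _ _ (by decide) (by simp [List.isPrefixOf]; exact fun h => h1 h.symm),
      pvReplace_cons_neg _ _ _ _ (by decide) (by simp [List.isPrefixOf]; exact fun h => h2 h.symm),
      pvReplace_cons_neg _ _ _ _ (by decide) (by simp [List.isPrefixOf]; exact fun h => h3 h.symm),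
      ih, pvScanE.eq_5 c t h1 h2 h3]

theorem pvL5 (l : List Char) : pvScanE (pvScanD l) = pvScanB l := by
  induction l using pvScanB.induct with
  | case1 => rfl
  | case2 t ih => rw [pvScanD.eq_2, pvScanE.eq_4, ih, pvScanB.eq_2]
  | case3 t ih => rw [pvScanD.eq_3, pvScanE.eq_4, ih, pvScanB.eq_3]
  | case4 t hns ih => rw [pvScanD.eq_4 t hns, pvScanE.eq_4, ih, pvScanB.eq_4 t hns]
  | case5 t hns ih => rw [pvScanD.eq_5 t hns, pvScanE.eq_4, ih, pvScanB.eq_5 t hns]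
  | case6 t ih =>
    rw [pvScanD.eq_6 _ _ (fun _ hh _ => absurd hh (by decide)) (fun _ hh _ => absurd hh (by decide))
      (fun hh => absurd hh (by decide)) (fun hh => absurd hh (by decide)),
      pvScanE.eq_2, ih, pvScanB.eq_6]
  | case7 t ih =>
    rw [pvScanD.eq_6 _ _ (fun _ hh _ => absurd hh (by decide)) (fun _ hh _ => absurd hh (by decide))
      (fun hh => absurd hh (by decide)) (fun hh => absurd hh (by decide)),
      pvScanE.eq_3, ih, pvScanB.eq_7]
  | case8 t ih =>
    rw [pvScanD.eq_6 _ _ (fun _ hh _ => absurd hh (by decide)) (fun _ hh _ => absurd hh (by decide))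
      (fun hh => absurd hh (by decide)) (fun hh => absurd hh (by decide)),
      pvScanE.eq_4, ih, pvScanB.eq_8]
  | case9 c t h1 h2 h3 h4 h5 h6 h7 ih =>
    rw [pvScanD.eq_6 c t h1 h2 h3 h4, pvScanE.eq_5 c _ h5 h6 h7, ih,
      pvScanB.eq_9 c t h1 h2 h3 h4 h5 h6 h7]

-- ===== VERDICT (by name: the statement is the Claim_ definition above) =====
theorem escape_dot_label_py_spec : Claim_equal_escape_dot_label_py := by
  intro text _
  unfold Spec_escape_dot_label_py escape_dot_label_py escape_dot_label_py_alt
  simp only [PySem.Str.replace, String.toList_ofList]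
  have h1 : (", ").toList = [',', ' '] := rfl
  have h2 : (",").toList = [','] := rfl
  have h3 : ("; ").toList = [';', ' '] := rfl
  have h4 : (";").toList = [';'] := rfl
  have h5 : ("\n").toList = ['\n'] := rfl
  have h6 : ("\\").toList = ['\\'] := rfl
  have h7 : ("\\\\").toList = ['\\', '\\'] := rfl
  have h8 : ("\"").toList = ['"'] := rfl
  have h9 : ("\\\"").toList = ['\\', '"'] := rfl
  have h10 : ("\\n").toList = ['\\', 'n'] := rfl
  rw [h1, h2, h3, h4, h5, h6, h7, h8, h9, h10, pvL1, pvL2, pvL3, pvL4, pvL5]
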